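-- pv_equiv track=rewrite | github.com/noproxy/twitterscraper | twitterscraper/log_process.py | ismissing_image
-- ===== SOURCE A (Python) =====
-- from typing import List
--
-- def ismissing_image(lines: List[str]):
--     has_image_fail = False
--     for line in lines:
--         if line.startswith('Level 25: download user') \
--                 or "INFO: Twitter returned : 'has_more_items'" in line \
--                 or line.startswith('INFO: Got'):
--             continue
--         if line.startswith('INFO: download ') and line.strip().endswith('retry = 1'):
--             has_image_fail = True
--             continue
--         return False
--
--     return has_image_fail
-- ===== SOURCE B (Python) =====
-- def _is_skip(line):
--     return (line.startswith('Level 25: download user')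
--             or "INFO: Twitter returned : 'has_more_items'" in line
--             or line.startswith('INFO: Got'))
--
-- def _is_fail(line):
--     return line.startswith('INFO: download ') and line.strip().endswith('retry = 1')
--
-- def ismissing_image(lines):
--     return (all(_is_skip(l) or _is_fail(l) for l in lines)
--             and any(not _is_skip(l) for l in lines))
-- ===== Notes on version B (the rewrite author's own statement) =====
-- stated objective: simpler
-- what changed: Replaces the single stateful loop with an accumulator flag by two predicate helpers and a declarative all(skip-or-fail) and any(not-skip) expression.
import Mathlib
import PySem

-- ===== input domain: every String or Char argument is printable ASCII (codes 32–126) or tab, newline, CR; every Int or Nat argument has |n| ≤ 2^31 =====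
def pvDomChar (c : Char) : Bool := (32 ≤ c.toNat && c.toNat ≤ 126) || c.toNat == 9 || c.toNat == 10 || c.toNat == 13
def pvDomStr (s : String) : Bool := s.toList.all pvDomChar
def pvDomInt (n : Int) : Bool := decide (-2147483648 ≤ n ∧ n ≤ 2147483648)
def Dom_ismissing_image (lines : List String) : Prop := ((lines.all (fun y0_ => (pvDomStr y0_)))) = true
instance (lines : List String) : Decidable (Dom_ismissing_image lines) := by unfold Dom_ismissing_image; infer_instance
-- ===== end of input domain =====

-- B is a simpler decomposition: two predicate helpers plus a declarative all/any expression
-- replacing A's stateful loop with an accumulator flag.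

-- ===== PORT A =====
-- the for-loop with 'continue' / early 'return False', carrying the has_image_fail flag
def ismissingLoop : List String → Bool → Bool
  | [], has_image_fail => has_image_fail
  | line :: rest, has_image_fail =>
    if PySem.Str.startswith line "Level 25: download user"
        || PySem.Str.isIn "INFO: Twitter returned : 'has_more_items'" line
        || PySem.Str.startswith line "INFO: Got" then
      ismissingLoop rest has_image_fail
    else if PySem.Str.startswith line "INFO: download "
        && PySem.Str.endswith (PySem.Str.strip line) "retry = 1" then
      ismissingLoop rest true
    else
      false

def ismissing_image (lines : List String) : Bool := ismissingLoop lines false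

-- ===== PORT B =====
def isSkip (line : String) : Bool :=
  PySem.Str.startswith line "Level 25: download user"
    || PySem.Str.isIn "INFO: Twitter returned : 'has_more_items'" line
    || PySem.Str.startswith line "INFO: Got"

def isFail (line : String) : Bool :=
  PySem.Str.startswith line "INFO: download "
    && PySem.Str.endswith (PySem.Str.strip line) "retry = 1"

def ismissing_image_alt (lines : List String) : Bool :=
  (lines.all fun l => isSkip l || isFail l) && (lines.any fun l => !isSkip l)

-- ===== PRECONDITION & SPEC =====
def Spec_ismissing_image (lines : List String) (out : Bool) : Prop := out = ismissing_image_alt lines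
instance (lines : List String) (out : Bool) : Decidable (Spec_ismissing_image lines out) := by unfold Spec_ismissing_image; infer_instance

-- ===== CLAIM (what is proved, stated in full; the proofs are below) =====
def Claim_equal_ismissing_image : Prop := ∀ (lines : List String), Dom_ismissing_image lines → Spec_ismissing_image lines (ismissing_image lines)

-- ===== LEMMAS AND PROOFS =====
-- loop invariant: the flag folds into the any-part
theorem ismissingLoop_eq (lines : List String) (f : Bool) :
    ismissingLoop lines f
      = ((lines.all fun l => isSkip l || isFail l)
          && (f || lines.any fun l => !isSkip l)) := by
  induction lines generalizing f with
  | nil => simp [ismissingLoop]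
  | cons l rest ih =>
    have hstep : ismissingLoop (l :: rest) f
        = if isSkip l then ismissingLoop rest f
          else if isFail l then ismissingLoop rest true
          else false := rfl
    rw [hstep, List.all_cons, List.any_cons]
    cases hs : isSkip l <;> cases hf : isFail l <;> simp [ih]

-- ===== VERDICT (by name: the statement is the Claim_ definition above) =====
theorem ismissing_image_spec : Claim_equal_ismissing_image := by
  intro lines _
  unfold Spec_ismissing_image ismissing_image ismissing_image_alt
  rw [ismissingLoop_eq]
  simp
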